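-- pv_equiv track=rewrite | github.com/Prav-een-B/AttendS | pipeline/table_detector.py | _merge_small_bands
-- ===== SOURCE A (Python) =====
-- def _merge_small_bands(bands: list, min_h: int = 18) -> list:
--     """Merge bands that are too thin (noise rows)."""
--     merged = []
--     i = 0
--     while i < len(bands):
--         s, e = bands[i]
--         if (e - s) < min_h and merged:
--             ps, pe = merged[-1]
--             merged[-1] = (ps, e)
--         else:
--             merged.append((s, e))
--         i += 1
--     return merged
-- ===== SOURCE B (Python) =====
-- def _merge_small_bands(bands: list, min_h: int = 18) -> list:
--     """Merge bands that are too thin (noise rows)."""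
--     groups = []
--     for s, e in bands:
--         if (e - s) >= min_h or not groups:
--             groups.append([(s, e)])
--         else:
--             groups[-1].append((s, e))
--     return [(g[0][0], g[-1][1]) for g in groups]
-- ===== Notes on version B (the rewrite author's own statement) =====
-- stated objective: alternative
-- what changed: Replaces A's in-place 'overwrite the last output tuple' merging with a two-phase build: first group consecutive thin bands into lists, then collapse each group to (first start, last end) in a comprehension.
import Mathlib
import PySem

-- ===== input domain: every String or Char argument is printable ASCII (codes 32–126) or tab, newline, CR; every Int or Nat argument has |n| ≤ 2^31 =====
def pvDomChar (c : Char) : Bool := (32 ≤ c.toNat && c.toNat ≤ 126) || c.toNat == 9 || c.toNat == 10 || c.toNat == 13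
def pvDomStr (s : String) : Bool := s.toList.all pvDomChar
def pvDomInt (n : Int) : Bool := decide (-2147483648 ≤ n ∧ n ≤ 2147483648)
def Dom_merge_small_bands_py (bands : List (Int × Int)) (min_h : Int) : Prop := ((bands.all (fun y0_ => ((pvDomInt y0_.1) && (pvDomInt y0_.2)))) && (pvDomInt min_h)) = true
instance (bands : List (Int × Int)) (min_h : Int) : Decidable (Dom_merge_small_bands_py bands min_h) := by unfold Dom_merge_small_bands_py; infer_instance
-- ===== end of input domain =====

-- B replaces A's in-place "overwrite the last output tuple" merge with a two-phase
-- group-then-collapse decomposition (objective: alternative; same O(n) cost).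


-- ===== PORT A =====
-- while loop over bands carrying `merged`; a thin band overwrites merged[-1]'s end.
def merge_small_bands_py (bands : List (Int × Int)) (min_h : Int) : List (Int × Int) :=
  bands.foldl (fun merged b =>
    if b.2 - b.1 < min_h ∧ merged ≠ [] then
      merged.dropLast ++ [((merged.getLastD (0, 0)).1, b.2)]
    else
      merged ++ [b]) []

-- ===== PORT B =====
-- collapse g = (g[0][0], g[-1][1]); each group is nonempty in every reachable state,
-- so the defaults (headI / getLastD) are never the value used (Python would IndexError on []).
def pvCollapse (g : List (Int × Int)) : Int × Int := (g.headI.1, (g.getLastD (0, 0)).2)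

def merge_small_bands_py_alt (bands : List (Int × Int)) (min_h : Int) : List (Int × Int) :=
  (bands.foldl (fun groups b =>
    if min_h ≤ b.2 - b.1 ∨ groups = [] then
      groups ++ [[b]]
    else
      groups.dropLast ++ [groups.getLastD [] ++ [b]]) ([] : List (List (Int × Int)))).map pvCollapse

-- ===== PRECONDITION & SPEC =====
def Spec_merge_small_bands_py (bands : List (Int × Int)) (min_h : Int) (out : List (Int × Int)) : Prop := out = merge_small_bands_py_alt bands min_h
instance (bands : List (Int × Int)) (min_h : Int) (out : List (Int × Int)) : Decidable (Spec_merge_small_bands_py bands min_h out) := by unfold Spec_merge_small_bands_py; infer_instance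

-- ===== CLAIM (what is proved, stated in full; the proofs are below) =====
def Claim_equal_merge_small_bands_py : Prop := ∀ (bands : List (Int × Int)) (min_h : Int), Dom_merge_small_bands_py bands min_h → Spec_merge_small_bands_py bands min_h (merge_small_bands_py bands min_h)

-- ===== LEMMAS AND PROOFS =====

-- Invariant: A's accumulator is B's accumulator mapped through pvCollapse,
-- provided every group so far is nonempty.
theorem merge_inv (min_h : Int) (bands : List (Int × Int)) :
    ∀ (groups : List (List (Int × Int))), (∀ g ∈ groups, g ≠ []) →
    bands.foldl (fun merged b =>
      if b.2 - b.1 < min_h ∧ merged ≠ [] then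
        merged.dropLast ++ [((merged.getLastD (0, 0)).1, b.2)]
      else merged ++ [b]) (groups.map pvCollapse)
    = (bands.foldl (fun groups b =>
        if min_h ≤ b.2 - b.1 ∨ groups = [] then groups ++ [[b]]
        else groups.dropLast ++ [groups.getLastD [] ++ [b]]) groups).map pvCollapse := by
  induction bands with
  | nil => intro groups _; simp
  | cons b bs ih =>
    intro groups hne
    simp only [List.foldl_cons]
    by_cases hc : min_h ≤ b.2 - b.1 ∨ groups = []
    · have hA : ¬ (b.2 - b.1 < min_h ∧ groups.map pvCollapse ≠ []) := by
        rcases hc with h | h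
        · intro ⟨h1, _⟩; omega
        · intro ⟨_, h2⟩; simp [h] at h2
      rw [if_neg hA, if_pos hc]
      have : groups.map pvCollapse ++ [b] = (groups ++ [[b]]).map pvCollapse := by
        simp [pvCollapse]
      rw [this]
      refine ih _ ?_
      intro g hg
      rcases List.mem_append.1 hg with h | h
      · exact hne g h
      · simp at h; simp [h]
    · rw [not_or] at hc
      obtain ⟨hthin, hgs⟩ := hc
      obtain ⟨gs, g, rfl⟩ := (List.eq_nil_or_concat groups).resolve_left hgs
      simp only [List.concat_eq_append] at *
      have hA : b.2 - b.1 < min_h ∧ (gs ++ [g]).map pvCollapse ≠ [] := by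
        exact ⟨by omega, by simp⟩
      rw [if_pos hA, if_neg (by rintro (h | h); exacts [absurd h (by omega), hgs h])]
      have hgne : g ≠ [] := hne g (by simp)
      have h1 : ((gs ++ [g]).map pvCollapse).dropLast = gs.map pvCollapse := by
        simp
      have h2 : ((gs ++ [g]).map pvCollapse).getLastD (0, 0) = pvCollapse g := by
        simp
      have h3 : (gs ++ [g]).dropLast = gs := by simp
      have h4 : (gs ++ [g]).getLastD [] = g := by simp
      rw [h1, h2, h3, h4]
      have h5 : ((pvCollapse g).1, b.2) = pvCollapse (g ++ [b]) := by
        obtain ⟨x, g', rfl⟩ := List.exists_cons_of_ne_nil hgne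
        have : x :: g' ++ [b] = (x :: g') ++ [b] := rfl
        simp [pvCollapse, List.getLastD]
      rw [h5]
      have : gs.map pvCollapse ++ [pvCollapse (g ++ [b])] = (gs ++ [g ++ [b]]).map pvCollapse := by simp
      rw [this]
      refine ih _ ?_
      intro g' hg'
      rcases List.mem_append.1 hg' with h | h
      · exact hne g' (List.mem_append_left _ h)
      · simp at h; simp [h]

-- ===== VERDICT (by name: the statement is the Claim_ definition above) =====
theorem merge_small_bands_py_spec : Claim_equal_merge_small_bands_py := by
  intro bands min_h _
  unfold Spec_merge_small_bands_py merge_small_bands_py merge_small_bands_py_alt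
  have := merge_inv min_h bands [] (by simp)
  simpa using this
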